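-- pv_equiv track=rewrite | github.com/krishnakumarbhat/plotly_code | simg_zmq/KPI/can_kpi/kpi/sil_radar_validation.py | _candidate_dataset_paths
-- ===== SOURCE A (Python) =====
-- from typing import Dict, Iterable, List, Mapping, Optional, Sequence, Tuple
--
-- def _leaf_name(path: str) -> str:
--     return path.split("/")[-1]
--
-- def _candidate_dataset_paths(all_paths: Sequence[str], preferred_leaf_names: Sequence[str]) -> List[str]:
--     leaf_to_paths: Dict[str, List[str]] = {}
--     for p in all_paths:
--         leaf_to_paths.setdefault(_leaf_name(p).lower(), []).append(p)
--
--     candidates: List[str] = []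
--     for pref in preferred_leaf_names:
--         key = pref.lower()
--         if key in leaf_to_paths:
--             candidates.extend(sorted(leaf_to_paths[key], key=lambda s: (s.count("/"), len(s))))
--     return candidates
-- ===== SOURCE B (Python) =====
-- def _leaf_name(path: str) -> str:
--     return path.split("/")[-1]
--
-- def _candidate_dataset_paths(all_paths, preferred_leaf_names):
--     candidates = []
--     for pref in preferred_leaf_names:
--         key = pref.lower()
--         matches = [p for p in all_paths if _leaf_name(p).lower() == key]
--         candidates.extend(sorted(matches, key=lambda s: (s.count("/"), len(s))))
--     return candidates
-- ===== Notes on version B (the rewrite author's own statement) =====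
-- stated objective: simpler
-- what changed: Drops the leaf_to_paths grouping dict entirely: each preferred name directly filters all_paths for matching lowered leaf names and sorts the matches, so there is no index-building pass and no dict membership test.
import Mathlib
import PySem

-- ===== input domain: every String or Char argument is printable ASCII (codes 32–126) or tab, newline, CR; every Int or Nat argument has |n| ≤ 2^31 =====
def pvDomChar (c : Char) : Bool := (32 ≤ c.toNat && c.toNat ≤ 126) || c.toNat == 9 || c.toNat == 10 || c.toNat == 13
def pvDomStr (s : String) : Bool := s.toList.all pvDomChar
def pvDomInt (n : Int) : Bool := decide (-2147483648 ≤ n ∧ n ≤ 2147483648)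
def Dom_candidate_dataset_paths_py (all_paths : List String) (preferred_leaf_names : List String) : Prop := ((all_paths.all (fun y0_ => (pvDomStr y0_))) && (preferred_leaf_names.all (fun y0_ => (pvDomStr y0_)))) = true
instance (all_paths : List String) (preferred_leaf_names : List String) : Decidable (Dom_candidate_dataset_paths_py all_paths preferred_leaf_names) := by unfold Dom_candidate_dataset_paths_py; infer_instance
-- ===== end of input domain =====

-- B drops A's grouping dict: each preferred name filters all_paths directly and sorts the matches (simpler, no index pass).

-- ===== PORT A =====
-- _leaf_name: path.split("/")[-1]. split? with sep "/" ≠ "" never returns none, and the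
-- resulting list is always nonempty so pyGet? (-1) never hits the .getD defaults.
def pvLeafName (path : String) : String :=
  (PySem.List.pyGet? ((PySem.Str.split? path "/").getD []) (-1)).getD ""

-- the lowered leaf key used by both Pythons
def pvKeyOf (p : String) : String := PySem.Str.lower (pvLeafName p)

-- A: build leaf_to_paths by setdefault(key, []).append(p) (= d[key] = d.get(key, []) + [p],
-- i.e. Dict.modify), then for each pref emit sorted(d[key], key=lambda s: (s.count("/"), len(s)))
-- when the key is present.
def candidate_dataset_paths_py (all_paths : List String) (preferred_leaf_names : List String) : List String :=
  let leaf_to_paths : PySem.Dict String (List String) :=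
    all_paths.foldl (fun d p => d.modify (pvKeyOf p) [] (· ++ [p])) PySem.Dict.empty
  preferred_leaf_names.foldl (fun candidates pref =>
    let key := PySem.Str.lower pref
    if leaf_to_paths.contains key then
      candidates ++ PySem.List.sorted2 (leaf_to_paths.getD key [])
        (fun s => PySem.Str.count s "/") PySem.Str.len
    else candidates) []

-- ===== PORT B =====
def candidate_dataset_paths_py_alt (all_paths : List String) (preferred_leaf_names : List String) : List String :=
  preferred_leaf_names.foldl (fun candidates pref =>
    let key := PySem.Str.lower pref
    candidates ++ PySem.List.sorted2 (all_paths.filter (fun p => pvKeyOf p == key))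
      (fun s => PySem.Str.count s "/") PySem.Str.len) []

-- ===== PRECONDITION & SPEC =====
def Spec_candidate_dataset_paths_py (all_paths : List String) (preferred_leaf_names : List String) (out : List String) : Prop := out = candidate_dataset_paths_py_alt all_paths preferred_leaf_names
instance (all_paths : List String) (preferred_leaf_names : List String) (out : List String) : Decidable (Spec_candidate_dataset_paths_py all_paths preferred_leaf_names out) := by unfold Spec_candidate_dataset_paths_py; infer_instance

-- ===== CLAIM (what is proved, stated in full; the proofs are below) =====
def Claim_equal_candidate_dataset_paths_py : Prop := ∀ (all_paths : List String) (preferred_leaf_names : List String), Dom_candidate_dataset_paths_py all_paths preferred_leaf_names → Spec_candidate_dataset_paths_py all_paths preferred_leaf_names (candidate_dataset_paths_py all_paths preferred_leaf_names)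

-- ===== LEMMAS AND PROOFS =====

-- the grouping fold's entry at k is exactly the in-order filter of the scanned paths
theorem pv_getD_fold (l : List String) (d : PySem.Dict String (List String)) (k : String) :
    (l.foldl (fun d p => d.modify (pvKeyOf p) [] (· ++ [p])) d).getD k []
      = d.getD k [] ++ l.filter (fun p => pvKeyOf p == k) := by
  induction l generalizing d with
  | nil => simp
  | cons p t ih =>
    simp only [List.foldl_cons, List.filter_cons, ih]
    rw [PySem.Dict.getD_modify]
    by_cases h : k = pvKeyOf p
    · simp [h]
    · have h' : (pvKeyOf p == k) = false := by
        simp only [beq_eq_false_iff_ne]; exact fun e => h e.symm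
      rw [if_neg h, h']
      simp

-- the grouping fold contains k iff some path has key k
theorem pv_contains_fold (l : List String) (k : String) :
    (l.foldl (fun d p => d.modify (pvKeyOf p) [] (· ++ [p])) PySem.Dict.empty).contains k = true
      ↔ ∃ p ∈ l, pvKeyOf p = k := by
  rw [PySem.Dict.contains_iff_mem_keys, PySem.Dict.keys_foldl_modify_key l pvKeyOf []
        (fun d x v => v ++ [x]) PySem.Dict.empty]
  simp only [PySem.Dict.keys_empty, PySem.Set.update_nil_left, PySem.Set.mem_ofList, List.mem_map]

-- the per-preference loops agree for any abstract dict behaving like the grouping fold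
theorem pv_loop (all_paths : List String) (d : PySem.Dict String (List String))
    (hg : ∀ k, d.getD k [] = all_paths.filter (fun p => pvKeyOf p == k))
    (hc : ∀ k, d.contains k = true ↔ ∃ p ∈ all_paths, pvKeyOf p = k)
    (t acc : List String) :
    t.foldl (fun candidates pref =>
        let key := PySem.Str.lower pref
        if d.contains key then
          candidates ++ PySem.List.sorted2 (d.getD key [])
            (fun s => PySem.Str.count s "/") PySem.Str.len
        else candidates) acc
      = t.foldl (fun candidates pref =>
        let key := PySem.Str.lower pref
        candidates ++ PySem.List.sorted2 (all_paths.filter (fun p => pvKeyOf p == key))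
          (fun s => PySem.Str.count s "/") PySem.Str.len) acc := by
  induction t generalizing acc with
  | nil => rfl
  | cons pref t ih =>
    simp only [List.foldl_cons]
    by_cases h : d.contains (PySem.Str.lower pref) = true
    · rw [if_pos h, hg, ih]
    · rw [if_neg h]
      have hfil : all_paths.filter (fun p => pvKeyOf p == PySem.Str.lower pref) = [] := by
        rw [List.filter_eq_nil_iff]
        intro p hp hpk
        exact h ((hc (PySem.Str.lower pref)).mpr ⟨p, hp, by simpa using hpk⟩)
      have h0 : PySem.List.sorted2 ([] : List String)
          (fun s => PySem.Str.count s "/") PySem.Str.len = [] := rfl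
      rw [ih, hfil, h0, List.append_nil]

theorem pv_main (all_paths preferred_leaf_names : List String) :
    candidate_dataset_paths_py all_paths preferred_leaf_names
      = candidate_dataset_paths_py_alt all_paths preferred_leaf_names := by
  unfold candidate_dataset_paths_py candidate_dataset_paths_py_alt
  exact pv_loop all_paths _
    (fun k => by rw [pv_getD_fold]; simp)
    (fun k => pv_contains_fold all_paths k)
    preferred_leaf_names []

-- ===== VERDICT (by name: the statement is the Claim_ definition above) =====
theorem candidate_dataset_paths_py_spec : Claim_equal_candidate_dataset_paths_py := by
  intro all_paths preferred_leaf_names _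
  exact pv_main all_paths preferred_leaf_names
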